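-- pv_equiv track=rewrite | github.com/KINGAKWO/freeCodeCamp_Daily_Challenge | Day_06/3strikes.py | squares_with_three
-- ===== SOURCE A (Python) =====
-- def squares_with_three(n):
--     target = '3'
--     count = 0
--     for num in range(1,n+1):
--         square = num**2
--         my_list = list(str(abs(square)))
--         if target in my_list:
--             count += 1
--     return count
-- ===== SOURCE B (Python) =====
-- def _has_three(d):
--     # arithmetic digit peel: is 3 a decimal digit of d (d >= 0)?
--     while d:
--         if d % 10 == 3:
--             return True
--         d //= 10
--     return False
--
-- def squares_with_three(n):
--     return sum(1 for num in range(1, n + 1) if _has_three(num * num))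
-- ===== Notes on version B (the rewrite author's own statement) =====
-- stated objective: alternative
-- what changed: Replaces the string conversion plus list membership test per square with an arithmetic digit-peeling loop (mod/div by 10 with early exit) and a sum-over-generator decomposition instead of an explicit counter loop.
import Mathlib
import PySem

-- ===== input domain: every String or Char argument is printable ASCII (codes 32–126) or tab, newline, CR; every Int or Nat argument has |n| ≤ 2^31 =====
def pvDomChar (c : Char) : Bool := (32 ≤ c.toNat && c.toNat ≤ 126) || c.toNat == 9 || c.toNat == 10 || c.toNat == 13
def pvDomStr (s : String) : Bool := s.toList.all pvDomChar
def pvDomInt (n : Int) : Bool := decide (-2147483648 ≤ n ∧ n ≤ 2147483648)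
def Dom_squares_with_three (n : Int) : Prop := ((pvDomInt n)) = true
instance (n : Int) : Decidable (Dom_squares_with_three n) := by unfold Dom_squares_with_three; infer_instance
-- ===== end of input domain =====

-- B replaces the per-square string conversion + membership test with an arithmetic
-- digit-peeling loop and a sum-over-filter decomposition; same cost, no speed claim.


-- ===== PORT A =====
-- list(str(abs(square))) is the list of decimal characters: PySem.Int.toChars (|square|)
def squares_with_three (n : Int) : Int :=
  (PySem.List.pyRange 1 (n + 1) 1).foldl
    (fun count num =>
      let square := num ^ 2
      let myList := PySem.Int.toChars |square|
      if '3' ∈ myList then count + 1 else count)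
    0

-- ===== PORT B =====
-- the while loop of _has_three, exact for the nonnegative d B feeds it (d = num*num ≥ 0)
def hasThree (d : Nat) : Bool :=
  if d = 0 then false
  else if d % 10 = 3 then true
  else hasThree (d / 10)

def squares_with_three_alt (n : Int) : Int :=
  (((PySem.List.pyRange 1 (n + 1) 1).filter
      (fun num => hasThree (num * num).toNat)).map (fun _ => (1 : Int))).sum

-- ===== PRECONDITION & SPEC =====
def Spec_squares_with_three (n : Int) (out : Int) : Prop := out = squares_with_three_alt n
instance (n : Int) (out : Int) : Decidable (Spec_squares_with_three n out) := by unfold Spec_squares_with_three; infer_instance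

-- ===== CLAIM (what is proved, stated in full; the proofs are below) =====
def Claim_equal_squares_with_three : Prop := ∀ (n : Int), Dom_squares_with_three n → Spec_squares_with_three n (squares_with_three n)

-- ===== LEMMAS AND PROOFS =====

lemma digitChar_eq_three_iff (r : Nat) (hr : r < 10) : Nat.digitChar r = '3' ↔ r = 3 := by
  interval_cases r <;> decide

lemma toDigitsCore_succ (b f n : Nat) (ds : List Char) :
    Nat.toDigitsCore b (f + 1) n ds =
      if n / b = 0 then (n % b).digitChar :: ds
      else Nat.toDigitsCore b f (n / b) ((n % b).digitChar :: ds) := rfl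

lemma mem_toDigitsCore (fuel : Nat) :
    ∀ (m : Nat) (ds : List Char), m < fuel →
      ('3' ∈ Nat.toDigitsCore 10 fuel m ds ↔ hasThree m = true ∨ '3' ∈ ds) := by
  induction fuel with
  | zero => intro m ds h; omega
  | succ f ih =>
    intro m ds h
    rw [toDigitsCore_succ]
    have hlt : m % 10 < 10 := Nat.mod_lt _ (by omega)
    by_cases h0 : m / 10 = 0
    · have hm : m < 10 := by
        rcases Nat.lt_or_ge m 10 with hc | hc
        · exact hc
        · exact absurd h0 (by have := Nat.one_le_div_iff (by omega : 0 < 10) |>.mpr hc; omega)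
      have hmod : m % 10 = m := Nat.mod_eq_of_lt hm
      rw [if_pos h0, List.mem_cons, hmod]
      rcases Nat.eq_zero_or_pos m with hz | hp
      · subst hz; rw [hasThree]; simp
        exact fun hc => absurd hc (by decide)
      · rw [hasThree, if_neg (by omega), hmod, h0]
        constructor
        · rintro (hc | hc)
          · left
            rw [if_pos ((digitChar_eq_three_iff m hm).mp hc.symm)]
          · exact Or.inr hc
        · rintro (hc | hc)
          · by_cases h3 : m = 3
            · subst h3; left; rfl
            · rw [if_neg h3, hasThree] at hc; simp at hc
          · exact Or.inr hc
    · have hm0 : m ≠ 0 := fun hz => by subst hz; simp at h0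
      have hstep : m / 10 < f := by
        have h1 : m / 10 < m := Nat.div_lt_self (by omega) (by omega)
        omega
      rw [if_neg h0, ih (m / 10) _ hstep]
      conv_rhs => rw [hasThree, if_neg hm0]
      by_cases h3 : m % 10 = 3
      · rw [if_pos h3, h3]
        constructor
        · intro _; exact Or.inl rfl
        · intro _; right; exact List.mem_cons_self
      · rw [if_neg h3]
        constructor
        · rintro (hc | hc)
          · exact Or.inl hc
          · rcases List.mem_cons.mp hc with hc | hc
            · exact absurd ((digitChar_eq_three_iff _ hlt).mp hc.symm) h3
            · exact Or.inr hc
        · rintro (hc | hc)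
          · exact Or.inl hc
          · exact Or.inr (List.mem_cons_of_mem _ hc)

lemma mem_toDigits_iff (m : Nat) : ('3' ∈ Nat.toDigits 10 m) ↔ hasThree m = true := by
  rw [Nat.toDigits, mem_toDigitsCore (m + 1) m [] (by omega)]
  simp

lemma pred_iff (num : Int) :
    ('3' ∈ PySem.Int.toChars (num ^ 2)) ↔ hasThree (num * num).toNat = true := by
  have hsq : (0 : Int) ≤ num ^ 2 := sq_nonneg num
  rw [PySem.Int.toChars, if_neg (by omega)]
  have hmul : (num ^ 2).toNat = (num * num).toNat := by rw [sq]
  rw [hmul]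
  exact mem_toDigits_iff _

theorem squares_with_three_eq (n : Int) :
    squares_with_three n = squares_with_three_alt n := by
  unfold squares_with_three squares_with_three_alt
  have hfun : (fun (count num : Int) =>
        let square := num ^ 2
        let myList := PySem.Int.toChars |square|
        if '3' ∈ myList then count + 1 else count)
      = (fun (count num : Int) =>
          if (fun num => decide ('3' ∈ PySem.Int.toChars |num ^ 2|)) num = true
          then count + 1 else count) := by
    funext count num
    by_cases h : '3' ∈ PySem.Int.toChars |num ^ 2| <;> simp [h]
  rw [hfun, PySem.List.foldl_count_if, PySem.List.sum_map_const_int,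
    ← List.countP_eq_length_filter]
  have hcnt : (PySem.List.pyRange 1 (n + 1) 1).countP
      (fun num => decide ('3' ∈ PySem.Int.toChars |num ^ 2|))
      = (PySem.List.pyRange 1 (n + 1) 1).countP
          (fun num => hasThree (num * num).toNat) := by
    apply List.countP_congr
    intro x _
    simp [abs_of_nonneg (sq_nonneg x), pred_iff x]
  rw [hcnt]
  ring

-- ===== VERDICT (by name: the statement is the Claim_ definition above) =====
theorem squares_with_three_spec : Claim_equal_squares_with_three := by
  intro n _
  unfold Spec_squares_with_three
  exact squares_with_three_eq n
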